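-- pv_equiv track=rewrite | github.com/Tarunno360/Data-Structure | Rotation of 2D matrix.py | rotate_columns
-- ===== SOURCE A (Python) =====
-- def rotate_columns(matrix, times=3):
--     rows, cols = len(matrix), len(matrix[0])
--
--     for _ in range(times):
--         # Rotate each column independently
--         last_row = matrix[-1][:]  # Copy last row
--
--         for r in range(rows - 1, 0, -1):  # Shift each column downward
--             for c in range(cols):
--                 matrix[r][c] = matrix[r - 1][c]
--
--         # Move last row to first row
--         for c in range(cols):
--             matrix[0][c] = last_row[c]
--
--     return matrix
-- ===== SOURCE B (Python) =====
-- def rotate_columns(matrix, times=3):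
--     rows, cols = len(matrix), len(matrix[0])
--     shift = times % rows if times > 0 else 0
--     if shift != 0:
--         heads = [row[:cols] for row in matrix]
--         for r in range(rows):
--             matrix[r][:cols] = heads[(r - shift) % rows]
--     return matrix
-- ===== Notes on version B (the rewrite author's own statement) =====
-- stated objective: faster
-- what changed: A shifts every column cell-by-cell once per iteration of a times-step outer loop (O(times*rows*cols)); B computes shift = times % rows once and performs a single pass that slice-assigns each row's first cols entries from row (r - shift) % rows, eliminating the outer repetition loop entirely (O(rows*cols)).
import Mathlib
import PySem

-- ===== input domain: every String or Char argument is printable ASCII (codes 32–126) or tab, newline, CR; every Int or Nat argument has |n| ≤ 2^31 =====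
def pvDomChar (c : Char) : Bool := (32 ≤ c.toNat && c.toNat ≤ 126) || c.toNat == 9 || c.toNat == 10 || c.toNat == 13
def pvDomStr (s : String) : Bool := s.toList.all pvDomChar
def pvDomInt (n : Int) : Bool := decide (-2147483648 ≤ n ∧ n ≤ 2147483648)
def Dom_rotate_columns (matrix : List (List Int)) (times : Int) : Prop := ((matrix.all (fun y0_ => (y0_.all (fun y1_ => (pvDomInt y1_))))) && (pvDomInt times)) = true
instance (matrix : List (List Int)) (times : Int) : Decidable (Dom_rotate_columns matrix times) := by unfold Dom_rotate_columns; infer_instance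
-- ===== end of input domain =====

-- B replaces A's times·rows·cols cell-by-cell shifting loop nest by a single modular-rotation
-- pass (shift = times % rows, each row's first cols entries taken from row (r-shift) % rows).
-- Both Pythons mutate `matrix` in place in the same way; the equivalence proved here is about
-- the return value.

-- ===== PORT A =====
-- one iteration of A's outer `for _ in range(times)` loop (rows, cols fixed, as in Python)
def pyStep (rows cols : Int) (m : List (List Int)) : List (List Int) :=
  let last_row := PySem.List.pyGetD m (-1) []
  let m1 := (PySem.List.pyRange (rows - 1) 0 (-1)).foldl (fun m2 r =>
      (PySem.List.pyRange 0 cols 1).foldl (fun m3 c =>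
        PySem.List.pySetD m3 r
          (PySem.List.pySetD (PySem.List.pyGetD m3 r []) c
            (PySem.List.pyGetD (PySem.List.pyGetD m3 (r - 1) []) c 0))) m2) m
  (PySem.List.pyRange 0 cols 1).foldl (fun m3 c =>
    PySem.List.pySetD m3 0
      (PySem.List.pySetD (PySem.List.pyGetD m3 0 []) c
        (PySem.List.pyGetD last_row c 0))) m1

def rotate_columns (matrix : List (List Int)) (times : Int) : List (List Int) :=
  let rows : Int := matrix.length
  let cols : Int := (PySem.List.pyGetD matrix 0 []).length
  (PySem.List.pyRange 0 times 1).foldl (fun m _ => pyStep rows cols m) matrix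

-- ===== PORT B =====
def rotate_columns_alt (matrix : List (List Int)) (times : Int) : List (List Int) :=
  let rows : Int := matrix.length
  let cols : Nat := (PySem.List.pyGetD matrix 0 []).length
  let shift : Int := if 0 < times then PySem.Int.mod times rows else 0
  if shift ≠ 0 then
    let heads := matrix.map (fun row => row.take cols)
    (PySem.List.pyRange 0 rows 1).foldl (fun m r =>
      PySem.List.pySetD m r
        (PySem.List.pyGetD heads (PySem.Int.mod (r - shift) rows) []
          ++ (PySem.List.pyGetD m r []).drop cols)) matrix
  else matrix

-- ===== PRECONDITION & SPEC =====
-- Pre_ excludes exactly the inputs on which A raises IndexError: the empty matrix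
-- (matrix[0]), and, when the loop runs (times > 0), a matrix with some row shorter
-- than len(matrix[0]) (reading/writing column c of that row raises).
def Pre_rotate_columns (matrix : List (List Int)) (times : Int) : Prop :=
  matrix ≠ [] ∧ (0 < times → ∀ row ∈ matrix, (matrix.headD []).length ≤ row.length)
instance (matrix : List (List Int)) (times : Int) : Decidable (Pre_rotate_columns matrix times) := by
  unfold Pre_rotate_columns; infer_instance

def pvWitness_rotate_columns : List (List Int) × Int := ([[1, 2], [3, 4], [5, 6]], 4)

def Spec_rotate_columns (matrix : List (List Int)) (times : Int) (out : List (List Int)) : Prop := out = rotate_columns_alt matrix times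
instance (matrix : List (List Int)) (times : Int) (out : List (List Int)) : Decidable (Spec_rotate_columns matrix times out) := by unfold Spec_rotate_columns; infer_instance

-- ===== CLAIM (what is proved, stated in full; the proofs are below) =====
def Claim_equal_rotate_columns : Prop := ∀ (matrix : List (List Int)) (times : Int), Dom_rotate_columns matrix times → Pre_rotate_columns matrix times → Spec_rotate_columns matrix times (rotate_columns matrix times)

-- ===== LEMMAS AND PROOFS =====

theorem getD_at (m : List (List Int)) {r : Nat} (h : r < m.length) : m.getD r [] = m[r] :=
  List.getD_eq_getElem m [] h

theorem loopF (src : List Int) (r : Nat) : ∀ (k : Nat) (m : List (List Int)),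
    r < m.length → k ≤ (m.getD r []).length → k ≤ src.length →
    (List.range k).foldl (fun m3 c => m3.set r ((m3.getD r []).set c (src.getD c 0))) m
      = m.set r (src.take k ++ (m.getD r []).drop k) := by
  intro k
  induction k with
  | zero =>
    intro m hr _ _
    simp only [List.range_zero, List.foldl_nil, List.take_zero, List.nil_append, List.drop_zero]
    rw [getD_at m hr, List.set_getElem_self]
  | succ k ih =>
    intro m hr hrow hsrc
    rw [List.range_succ, List.foldl_append]
    rw [ih m hr (by omega) (by omega)]
    have hkrow : k < (m.getD r []).length := by omega
    have hksrc : k < src.length := by omega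
    have htklen : (src.take k).length = k := by rw [List.length_take]; omega
    have hget : (m.set r (src.take k ++ (m.getD r []).drop k)).getD r [] = src.take k ++ (m.getD r []).drop k := by
      rw [getD_at _ (by simpa using hr), List.getElem_set_self]
    simp only [List.foldl_cons, List.foldl_nil, hget, List.set_set]
    congr 1
    rw [List.set_append_right _ _ (by omega), htklen, Nat.sub_self]
    rw [List.drop_eq_getElem_cons hkrow, List.set_cons_zero]
    rw [List.getD_eq_getElem _ _ hksrc]
    rw [List.take_add_one, List.getElem?_eq_getElem hksrc, List.append_assoc]
    simp only [Option.toList_some, List.singleton_append]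

theorem loopV (r : Nat) (hr1 : 1 ≤ r) : ∀ (k : Nat) (m : List (List Int)),
    r < m.length → k ≤ (m.getD r []).length → k ≤ (m.getD (r-1) []).length →
    (List.range k).foldl (fun m3 c => m3.set r ((m3.getD r []).set c ((m3.getD (r-1) []).getD c 0))) m
      = m.set r ((m.getD (r-1) []).take k ++ (m.getD r []).drop k) := by
  intro k
  induction k with
  | zero =>
    intro m hr _ _
    simp only [List.range_zero, List.foldl_nil, List.take_zero, List.nil_append, List.drop_zero]
    rw [getD_at m hr, List.set_getElem_self]
  | succ k ih =>
    intro m hr hrow hsrc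
    rw [List.range_succ, List.foldl_append]
    rw [ih m hr (by omega) (by omega)]
    have hkrow : k < (m.getD r []).length := by omega
    have hksrc : k < (m.getD (r-1) []).length := by omega
    have htklen : ((m.getD (r-1) []).take k).length = k := by rw [List.length_take]; omega
    have hset : (m.set r ((m.getD (r-1) []).take k ++ (m.getD r []).drop k)).getD r []
        = (m.getD (r-1) []).take k ++ (m.getD r []).drop k := by
      rw [getD_at _ (by simpa using hr), List.getElem_set_self]
    have hsrcget : (m.set r ((m.getD (r-1) []).take k ++ (m.getD r []).drop k)).getD (r-1) []
        = m.getD (r-1) [] := by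
      rw [getD_at _ (by simpa using (by omega : r - 1 < m.length)),
          List.getElem_set_ne (by omega), ← getD_at m (by omega)]
    simp only [List.foldl_cons, List.foldl_nil, hset, hsrcget, List.set_set]
    congr 1
    rw [List.set_append_right _ _ (by omega), htklen, Nat.sub_self]
    rw [List.drop_eq_getElem_cons hkrow, List.set_cons_zero]
    rw [List.getD_eq_getElem _ _ hksrc]
    rw [List.take_add_one, List.getElem?_eq_getElem hksrc, List.append_assoc]
    simp only [Option.toList_some, List.singleton_append]

theorem pyGetD_nonneg' {α : Type} [Inhabited α] (xs : List α) (i : Int) (d : α) (h : 0 ≤ i) :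
    PySem.List.pyGetD xs i d = xs.getD i.toNat d := by
  rw [PySem.List.pyGetD, PySem.List.pyGet?_of_nonneg _ h, List.getD_eq_getElem?_getD]

theorem innerBridge (cols : Nat) (rI : Int) (hr1 : 1 ≤ rI) (m : List (List Int)) :
    (PySem.List.pyRange 0 (cols : Int) 1).foldl (fun m3 c =>
        PySem.List.pySetD m3 rI
          (PySem.List.pySetD (PySem.List.pyGetD m3 rI []) c
            (PySem.List.pyGetD (PySem.List.pyGetD m3 (rI - 1) []) c 0))) m
      = (List.range cols).foldl (fun m3 c =>
          m3.set rI.toNat ((m3.getD rI.toNat []).set c ((m3.getD (rI.toNat - 1) []).getD c 0))) m := by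
  rw [PySem.List.pyRange_one]
  have h1 : ((cols : Int) - 0).toNat = cols := by omega
  rw [h1, List.foldl_map]
  have h2 : (rI - 1).toNat = rI.toNat - 1 := by omega
  apply PySem.List.foldl_congr_mem
  intro m3 c _
  rw [zero_add]
  rw [PySem.List.pySetD_of_nonneg _ _ (by omega)]
  rw [pyGetD_nonneg' m3 rI [] (by omega)]
  rw [pyGetD_nonneg' m3 (rI - 1) [] (by omega), h2]
  simp

theorem getD_mem (m : List (List Int)) (r : Nat) (h : r < m.length) : m.getD r [] ∈ m := by
  rw [List.getD_eq_getElem _ _ h]; exact List.getElem_mem h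

theorem getD_set_self' (m : List (List Int)) (i : Nat) (v : List Int) (hi : i < m.length) :
    (m.set i v).getD i [] = v := by
  rw [getD_at _ (by simpa using hi), List.getElem_set_self]

theorem getD_set_ne' (m : List (List Int)) (i j : Nat) (v : List Int) (hj : j < m.length)
    (hij : i ≠ j) : (m.set i v).getD j [] = m.getD j [] := by
  rw [getD_at _ (by simpa using hj), List.getElem_set_ne hij, ← getD_at m hj]

theorem listExt' (xs ys : List (List Int)) (hlen : xs.length = ys.length)
    (h : ∀ r, r < xs.length → xs.getD r [] = ys.getD r []) : xs = ys := by
  apply List.ext_getElem hlen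
  intro i h1 h2
  have := h i h1
  rwa [List.getD_eq_getElem _ _ h1, List.getD_eq_getElem _ _ h2] at this

theorem getD_map_range' (f : Nat → List Int) (n r : Nat) (h : r < n) :
    ((List.range n).map f).getD r [] = f r := by
  rw [List.getD_eq_getElem _ _ (by simp [h])]
  simp

theorem selfmap (m : List (List Int)) :
    (List.range m.length).map (fun r => m.getD r []) = m := by
  apply listExt'
  · simp
  · intro r hr
    simp only [List.length_map, List.length_range] at hr
    rw [getD_map_range' _ _ _ hr]

theorem loopD (cols : Nat) : ∀ (a : Nat) (m : List (List Int)), a < m.length →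
    (∀ row ∈ m, cols ≤ row.length) →
    (PySem.List.pyRange (a : Int) 0 (-1)).foldl (fun m2 r =>
        (PySem.List.pyRange 0 (cols : Int) 1).foldl (fun m3 c =>
          PySem.List.pySetD m3 r (PySem.List.pySetD (PySem.List.pyGetD m3 r []) c
            (PySem.List.pyGetD (PySem.List.pyGetD m3 (r - 1) []) c 0))) m2) m
      = (List.range m.length).map (fun r =>
          if 1 ≤ r ∧ r ≤ a then (m.getD (r-1) []).take cols ++ (m.getD r []).drop cols
          else m.getD r []) := by
  intro a
  induction a with
  | zero =>
    intro m _ _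
    rw [show ((0:Nat):Int) = (0:Int) from rfl, PySem.List.pyRange_neg_one_eq_nil le_rfl]
    simp only [List.foldl_nil]
    have : ∀ r ∈ List.range m.length,
        (if 1 ≤ r ∧ r ≤ 0 then (m.getD (r-1) []).take cols ++ (m.getD r []).drop cols
         else m.getD r []) = m.getD r [] := by
      intro r _
      have h0 : ¬ (1 ≤ r ∧ r ≤ 0) := by omega
      rw [if_neg h0]
    rw [List.map_congr_left this, selfmap]
  | succ a ih =>
    intro m ha rect
    have hcast : ((a+1 : Nat) : Int) - 1 = (a : Int) := by push_cast; ring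
    rw [PySem.List.pyRange_neg_one_cons (by exact_mod_cast Nat.succ_pos a), hcast, List.foldl_cons]
    rw [innerBridge cols ((a+1 : Nat) : Int) (by exact_mod_cast Nat.succ_le_succ (Nat.zero_le a)) m]
    have htn : ((a+1 : Nat) : Int).toNat = a + 1 := by omega
    rw [htn]
    have hlen1 : a + 1 < m.length := ha
    have hrowlen : cols ≤ (m.getD (a+1) []).length := rect _ (getD_mem m (a+1) hlen1)
    have hsrclen : cols ≤ (m.getD ((a+1)-1) []).length := rect _ (getD_mem m a (by omega))
    rw [loopV (a+1) (by omega) cols m hlen1 hrowlen hsrclen]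
    set nr := (m.getD ((a+1)-1) []).take cols ++ (m.getD (a+1) []).drop cols with hnr
    have hrect' : ∀ row ∈ m.set (a+1) nr, cols ≤ row.length := by
      intro row hrow
      rcases List.mem_or_eq_of_mem_set hrow with h | h
      · exact rect _ h
      · subst h
        rw [hnr]
        simp only [List.length_append, List.length_take, List.length_drop]
        omega
    rw [ih (m.set (a+1) nr) (by simpa using (by omega : a < m.length)) hrect']
    have hlenset : (m.set (a+1) nr).length = m.length := by simp
    rw [hlenset]
    apply List.map_congr_left
    intro r hr
    rw [List.mem_range] at hr
    by_cases h1 : 1 ≤ r ∧ r ≤ a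
    · have e1 : (m.set (a+1) nr).getD (r-1) [] = m.getD (r-1) [] :=
        getD_set_ne' m (a+1) (r-1) nr (by omega) (by omega)
      have e2 : (m.set (a+1) nr).getD r [] = m.getD r [] :=
        getD_set_ne' m (a+1) r nr (by omega) (by omega)
      simp only [h1, e1, e2]
      have h2 : 1 ≤ r ∧ r ≤ a + 1 := by omega
      simp [h2]
    · by_cases hre : r = a + 1
      · subst hre
        have e3 : (m.set (a+1) nr).getD (a+1) [] = nr := getD_set_self' m (a+1) nr hlen1
        simp only [h1, if_neg, not_false_iff, e3]
        have h2 : 1 ≤ a+1 ∧ a+1 ≤ a+1 := by omega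
        simp [h2, hnr]
      · have e2 : (m.set (a+1) nr).getD r [] = m.getD r [] :=
          getD_set_ne' m (a+1) r nr (by omega) (by omega)
        have h2 : ¬ (1 ≤ r ∧ r ≤ a + 1) := by omega
        rw [if_neg h1, if_neg h2]
        exact e2

theorem innerBridgeF (cols : Nat) (src : List Int) (m : List (List Int)) :
    (PySem.List.pyRange 0 (cols : Int) 1).foldl (fun m3 c =>
        PySem.List.pySetD m3 0
          (PySem.List.pySetD (PySem.List.pyGetD m3 0 []) c
            (PySem.List.pyGetD src c 0))) m
      = (List.range cols).foldl (fun m3 c =>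
          m3.set 0 ((m3.getD 0 []).set c (src.getD c 0))) m := by
  rw [PySem.List.pyRange_one]
  have h1 : ((cols : Int) - 0).toNat = cols := by omega
  rw [h1, List.foldl_map]
  apply PySem.List.foldl_congr_mem
  intro m3 c _
  rw [zero_add]
  rw [PySem.List.pySetD_of_nonneg _ _ le_rfl]
  rw [PySem.List.pyGetD_zero]
  simp

theorem pyStep_char (cols : Nat) (m : List (List Int)) (hne : m ≠ [])
    (rect : ∀ row ∈ m, cols ≤ row.length) :
    pyStep (m.length : Int) (cols : Int) m
      = (List.range m.length).map (fun r =>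
          (m.getD ((r + m.length - 1) % m.length) []).take cols ++ (m.getD r []).drop cols) := by
  have hn : 0 < m.length := List.length_pos_iff.mpr hne
  unfold pyStep
  have hlast : PySem.List.pyGetD m (-1) [] = m.getD (m.length - 1) [] := by
    rw [PySem.List.pyGetD_neg_one _ _ hne, List.getLast_eq_getElem, ← getD_at]
  have hcast : (m.length : Int) - 1 = ((m.length - 1 : Nat) : Int) := by omega
  rw [hcast, loopD cols (m.length - 1) m (by omega) rect]
  set m1 := (List.range m.length).map (fun r =>
      if 1 ≤ r ∧ r ≤ m.length - 1 then (m.getD (r-1) []).take cols ++ (m.getD r []).drop cols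
      else m.getD r []) with hm1
  have hm1len : m1.length = m.length := by rw [hm1]; simp
  have hm1zero : m1.getD 0 [] = m.getD 0 [] := by
    rw [hm1, getD_map_range' _ _ _ hn]
    simp
  rw [hlast, innerBridgeF cols (m.getD (m.length - 1) []) m1]
  rw [loopF (m.getD (m.length - 1) []) 0 cols m1 (by omega)
      (by rw [hm1zero]; exact rect _ (getD_mem m 0 hn))
      (rect _ (getD_mem m (m.length - 1) (by omega)))]
  apply listExt'
  · simp [hm1len]
  · intro r hr
    rw [List.length_set, hm1len] at hr
    by_cases hr0 : r = 0
    · subst hr0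
      rw [getD_set_self' m1 0 _ (by omega), hm1zero]
      rw [getD_map_range' _ _ _ hn]
      have : (0 + m.length - 1) % m.length = m.length - 1 := by
        rw [Nat.zero_add]; exact Nat.mod_eq_of_lt (by omega)
      rw [this]
    · rw [getD_set_ne' m1 0 r _ (by omega) (fun h => hr0 h.symm)]
      rw [hm1, getD_map_range' _ _ _ hr, getD_map_range' _ _ _ hr]
      have hcond : 1 ≤ r ∧ r ≤ m.length - 1 := by omega
      rw [if_pos hcond]
      have : r + m.length - 1 = (r - 1) + m.length := by omega
      rw [this, Nat.add_mod_right, Nat.mod_eq_of_lt (by omega)]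

def phiL (cols s : Nat) (m0 : List (List Int)) : List (List Int) :=
  (List.range m0.length).map (fun r =>
    (m0.getD ((r + (m0.length - s % m0.length)) % m0.length) []).take cols
      ++ (m0.getD r []).drop cols)

theorem modStep (n r k : Nat) (hn : 0 < n) :
    ((r + n - 1) % n + (n - k % n)) % n = (r + (n - (k+1) % n)) % n := by
  have ha : k % n < n := Nat.mod_lt _ hn
  set a := k % n with hadef
  have h1 : (k+1) % n = (a+1) % n := by
    rw [Nat.add_mod k 1 n, Nat.add_mod a 1 n, Nat.mod_eq_of_lt ha]
  rw [h1, Nat.mod_add_mod]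
  by_cases hc : a + 1 = n
  · have h2 : (a+1) % n = 0 := by rw [hc, Nat.mod_self]
    rw [h2]
    have h3 : r + n - 1 + (n - a) = r + n := by omega
    rw [h3, Nat.sub_zero]
  · have h2 : (a+1) % n = a+1 := Nat.mod_eq_of_lt (by omega)
    rw [h2]
    have h3 : r + n - 1 + (n - a) = (r + (n - (a+1))) + n := by omega
    rw [h3, Nat.add_mod_right]

theorem phiL_zero (cols : Nat) (m0 : List (List Int)) :
    phiL cols 0 m0 = m0 := by
  unfold phiL
  have : ∀ r ∈ List.range m0.length,
      (m0.getD ((r + (m0.length - 0 % m0.length)) % m0.length) []).take cols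
        ++ (m0.getD r []).drop cols = m0.getD r [] := by
    intro r hr
    rw [List.mem_range] at hr
    have h1 : (r + (m0.length - 0 % m0.length)) % m0.length = r := by
      rw [Nat.zero_mod, Nat.sub_zero, Nat.add_mod_right, Nat.mod_eq_of_lt hr]
    rw [h1, List.take_append_drop]
  rw [List.map_congr_left this, selfmap]

theorem phiL_mod (cols s : Nat) (m0 : List (List Int)) :
    phiL cols s m0 = phiL cols (s % m0.length) m0 := by
  unfold phiL
  rw [Nat.mod_mod_of_dvd s dvd_rfl]

theorem phiL_getD (cols s : Nat) (m0 : List (List Int)) (r : Nat) (hr : r < m0.length) :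
    (phiL cols s m0).getD r []
      = (m0.getD ((r + (m0.length - s % m0.length)) % m0.length) []).take cols
          ++ (m0.getD r []).drop cols := by
  unfold phiL
  rw [getD_map_range' _ _ _ hr]

theorem phiL_len (cols s : Nat) (m0 : List (List Int)) : (phiL cols s m0).length = m0.length := by
  unfold phiL; simp

theorem phiL_rect (cols s : Nat) (m0 : List (List Int)) (hn : 0 < m0.length)
    (rect : ∀ row ∈ m0, cols ≤ row.length) :
    ∀ row ∈ phiL cols s m0, cols ≤ row.length := by
  intro row hrow
  unfold phiL at hrow
  rw [List.mem_map] at hrow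
  obtain ⟨r, hr, hrow⟩ := hrow
  subst hrow
  have hidx : (r + (m0.length - s % m0.length)) % m0.length < m0.length := Nat.mod_lt _ hn
  have := rect _ (getD_mem m0 _ hidx)
  simp only [List.length_append, List.length_take, List.length_drop]
  omega

theorem iterA_char (cols : Nat) (m0 : List (List Int)) (hne : m0 ≠ [])
    (rect : ∀ row ∈ m0, cols ≤ row.length) : ∀ (k : Nat),
    (List.range k).foldl (fun m _ => pyStep (m0.length : Int) (cols : Int) m) m0
      = phiL cols k m0 := by
  have hn : 0 < m0.length := List.length_pos_iff.mpr hne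
  intro k
  induction k with
  | zero => simp [phiL_zero cols m0]
  | succ k ih =>
    rw [List.range_succ, List.foldl_append, ih]
    simp only [List.foldl_cons, List.foldl_nil]
    have hlen : (phiL cols k m0).length = m0.length := phiL_len cols k m0
    have hne' : phiL cols k m0 ≠ [] := by
      intro h
      rw [h] at hlen
      simp at hlen
      omega
    rw [show (m0.length : Int) = ((phiL cols k m0).length : Int) from by rw [hlen]]
    rw [pyStep_char cols (phiL cols k m0) hne' (phiL_rect cols k m0 hn rect)]
    apply listExt'
    · rw [List.length_map, List.length_range, phiL_len, phiL_len]
    · intro r hr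
      simp only [List.length_map, List.length_range, hlen] at hr
      rw [getD_map_range' _ _ _ (by rw [hlen]; exact hr)]
      rw [phiL_getD cols (k+1) m0 r hr]
      rw [hlen]
      have hidx : (r + m0.length - 1) % m0.length < m0.length := Nat.mod_lt _ hn
      rw [phiL_getD cols k m0 _ hidx, phiL_getD cols k m0 r hr]
      rw [List.take_left' (by
        rw [List.length_take]
        exact min_eq_left (rect _ (getD_mem m0 _ (Nat.mod_lt _ hn))))]
      rw [List.drop_left' (by
        rw [List.length_take]
        exact min_eq_left (rect _ (getD_mem m0 _ (Nat.mod_lt _ hn))))]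
      rw [modStep m0.length r k hn]

theorem loopB (cols : Nat) (F : Nat → List Int) : ∀ (k : Nat) (m0 : List (List Int)), k ≤ m0.length →
    (List.range k).foldl (fun m3 r => m3.set r (F r ++ (m3.getD r []).drop cols)) m0
      = (List.range m0.length).map (fun r =>
          if r < k then F r ++ (m0.getD r []).drop cols else m0.getD r []) := by
  intro k
  induction k with
  | zero =>
    intro m0 _
    simp only [List.range_zero, List.foldl_nil, Nat.not_lt_zero, if_false]
    rw [selfmap]
  | succ k ih =>
    intro m0 hk
    rw [List.range_succ, List.foldl_append, ih m0 (by omega)]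
    simp only [List.foldl_cons, List.foldl_nil]
    have hkn : k < m0.length := by omega
    have hprev : ((List.range m0.length).map (fun r =>
        if r < k then F r ++ (m0.getD r []).drop cols else m0.getD r [])).getD k []
          = m0.getD k [] := by
      rw [getD_map_range' _ _ _ hkn]
      simp
    rw [hprev]
    apply listExt'
    · simp
    · intro r hr
      simp only [List.length_set, List.length_map, List.length_range] at hr
      by_cases hrk : r = k
      · subst hrk
        rw [getD_set_self' _ _ _ (by simp [hr]), getD_map_range' _ _ _ hr]
        simp
      · rw [getD_set_ne' _ _ _ _ (by simp [hr]) (fun h => hrk h.symm)]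
        rw [getD_map_range' _ _ _ hr, getD_map_range' _ _ _ hr]
        by_cases hlt : r < k
        · rw [if_pos hlt, if_pos (by omega)]
        · rw [if_neg hlt, if_neg (by omega)]

theorem shift_val (times : Int) (n : Nat) (hpos : 0 < times) (hn : 0 < n) :
    PySem.Int.mod times (n : Int) = ((times.toNat % n : Nat) : Int) := by
  rw [PySem.Int.mod_eq_emod_of_pos (by exact_mod_cast hn)]
  conv_lhs => rw [← Int.toNat_of_nonneg (le_of_lt hpos)]
  rw [Int.natCast_mod]

theorem idx_val (r s n : Nat) (hs : s < n) (hrn : r < n) :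
    PySem.Int.mod ((r : Int) - ((s : Nat) : Int)) (n : Int) = (((r + n - s) % n : Nat) : Int) := by
  rw [PySem.Int.mod_eq_emod_of_pos (by exact_mod_cast (by omega : 0 < n))]
  have h1 : ((r + n - s : Nat) : Int) = (r : Int) - s + n := by
    push_cast [Nat.cast_sub (by omega : s ≤ r + n)]
    ring
  rw [Int.natCast_mod, h1, Int.add_emod_right]

theorem alt_char (matrix : List (List Int)) (times : Int) (hne : matrix ≠ []) (hpos : 0 < times) :
    rotate_columns_alt matrix times = phiL (matrix.getD 0 []).length times.toNat matrix := by
  have hn : 0 < matrix.length := List.length_pos_iff.mpr hne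
  set n := matrix.length with hndef
  set cols := (matrix.getD 0 []).length with hcols
  set s := times.toNat % n with hs
  have hsn : s < n := Nat.mod_lt _ hn
  unfold rotate_columns_alt
  dsimp only
  rw [PySem.List.pyGetD_zero, if_pos hpos, shift_val times n hpos hn]
  by_cases hs0 : s = 0
  · rw [← hs, hs0]
    simp only [Int.natCast_zero, ne_eq, not_true_eq_false, if_false]
    rw [phiL_mod, ← hs, hs0, phiL_zero cols matrix]
  · rw [← hs]
    have hne0 : ((s : Nat) : Int) ≠ 0 := by exact_mod_cast hs0
    rw [if_pos hne0]
    -- convert the pyRange fold to the Nat-range fold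
    rw [PySem.List.pyRange_one]
    have h1 : ((n : Int) - 0).toNat = n := by omega
    rw [h1, List.foldl_map]
    set heads := matrix.map (fun row => row.take cols) with hheads
    set F : Nat → List Int := fun r =>
      PySem.List.pyGetD heads (PySem.Int.mod ((r : Int) - ((s : Nat) : Int)) (n : Int)) [] with hF
    have hbody : (List.range n).foldl (fun m3 (r : Nat) =>
          PySem.List.pySetD m3 ((0 : Int) + r)
            (PySem.List.pyGetD heads (PySem.Int.mod (((0 : Int) + r) - ((s : Nat) : Int)) (n : Int)) []
              ++ (PySem.List.pyGetD m3 ((0 : Int) + r) []).drop cols)) matrix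
        = (List.range n).foldl (fun m3 r => m3.set r (F r ++ (m3.getD r []).drop cols)) matrix := by
      apply PySem.List.foldl_congr_mem
      intro m3 r _
      rw [zero_add, PySem.List.pySetD_natCast, PySem.List.pyGetD_natCast, hF]
    rw [hbody, loopB cols F n matrix le_rfl]
    unfold phiL
    apply List.map_congr_left
    intro r hr
    rw [List.mem_range] at hr
    rw [if_pos hr]
    congr 1
    rw [hF]
    simp only []
    rw [idx_val r s n hsn hr, PySem.List.pyGetD_natCast]
    have hidx : (r + n - s) % n < n := Nat.mod_lt _ hn
    have hhlen : (r + n - s) % n < heads.length := by rw [hheads]; simpa using hidx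
    rw [getD_at heads hhlen]
    have hh : heads[(r + n - s) % n]'hhlen = (matrix.getD ((r + n - s) % n) []).take cols := by
      rw [getD_at matrix (by simpa using hidx)]
      simp [hheads]
    rw [hh]
    have : r + (n - times.toNat % n) = r + n - s := by rw [← hs]; omega
    rw [this]

theorem headD_getD (matrix : List (List Int)) : matrix.headD [] = matrix.getD 0 [] := by
  cases matrix <;> simp

theorem main_eq (matrix : List (List Int)) (times : Int) (hne : matrix ≠ [])
    (hpre : 0 < times → ∀ row ∈ matrix, (matrix.headD []).length ≤ row.length) :
    rotate_columns matrix times = rotate_columns_alt matrix times := by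
  by_cases hpos : 0 < times
  · have rect : ∀ row ∈ matrix, (matrix.getD 0 []).length ≤ row.length := by
      intro row hrow
      rw [← headD_getD]
      exact hpre hpos row hrow
    unfold rotate_columns
    dsimp only
    rw [PySem.List.pyGetD_zero]
    rw [PySem.List.pyRange_one, Int.sub_zero, List.foldl_map]
    rw [iterA_char (matrix.getD 0 []).length matrix hne rect times.toNat]
    rw [alt_char matrix times hne hpos]
  · unfold rotate_columns
    dsimp only
    rw [PySem.List.pyRange_one_eq_nil (by omega)]
    unfold rotate_columns_alt
    dsimp only
    rw [if_neg hpos]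
    simp

theorem pv_witness_ok : Dom_rotate_columns pvWitness_rotate_columns.1 pvWitness_rotate_columns.2 ∧ Pre_rotate_columns pvWitness_rotate_columns.1 pvWitness_rotate_columns.2 := by
  constructor <;> decide

-- ===== VERDICT (by name: the statement is the Claim_ definition above) =====
theorem rotate_columns_spec : Claim_equal_rotate_columns := by
  intro matrix times _ hpre
  unfold Pre_rotate_columns at hpre
  unfold Spec_rotate_columns
  exact main_eq matrix times hpre.1 hpre.2
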